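-- pv_equiv track=rewrite | github.com/differentname123/auto_video | utils/common_utils.py | distribute_by_counts
-- ===== SOURCE A (Python) =====
-- def distribute_by_counts(accounts, allocation, default=None):
--     """
--     按顺序分配：
--     - accounts: 可迭代（例如 list(accounts.keys())）
--     - allocation: [(count, proxy), ...], count 可为 None 表示“剩下的全部”
--     - default: allocation 没覆盖到时的填充值
--     返回：与 accounts 等长的 proxy 列表
--     """
--     n = len(accounts)
--     proxies = []
--     assigned = 0
--     for count, proxy in allocation:
--         if count is None:
--             proxies += [proxy] * (n - assigned)
--             assigned = n
--             break
--         if count <= 0: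
--             continue
--         take = min(count, n - assigned)
--         proxies += [proxy] * take
--         assigned += take
--         if assigned >= n:
--             break
--     if assigned < n:
--         proxies += [default] * (n - assigned)
--     return proxies
-- ===== SOURCE B (Python) =====
-- def distribute_by_counts(accounts, allocation, default=None):
--     n = len(accounts)
--     out = []
--     i = 0
--     remaining = 0
--     current = None
--     for _ in range(n):
--         while remaining <= 0 and i < len(allocation):
--             count, proxy = allocation[i]
--             i += 1
--             if count is None:
--                 remaining = n
--                 current = proxy
--             elif count > 0:
--                 remaining = count
--                 current = proxy
--         if remaining > 0:
--             out.append(current)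
--             remaining -= 1
--         else:
--             out.append(default)
--     return out
-- ===== Notes on version B (the rewrite author's own statement) =====
-- stated objective: alternative
-- what changed: B replaces A's per-segment loop with bulk run-appends by a per-account loop that keeps a cursor into allocation and a remaining counter, emitting one proxy per account.
import Mathlib
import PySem

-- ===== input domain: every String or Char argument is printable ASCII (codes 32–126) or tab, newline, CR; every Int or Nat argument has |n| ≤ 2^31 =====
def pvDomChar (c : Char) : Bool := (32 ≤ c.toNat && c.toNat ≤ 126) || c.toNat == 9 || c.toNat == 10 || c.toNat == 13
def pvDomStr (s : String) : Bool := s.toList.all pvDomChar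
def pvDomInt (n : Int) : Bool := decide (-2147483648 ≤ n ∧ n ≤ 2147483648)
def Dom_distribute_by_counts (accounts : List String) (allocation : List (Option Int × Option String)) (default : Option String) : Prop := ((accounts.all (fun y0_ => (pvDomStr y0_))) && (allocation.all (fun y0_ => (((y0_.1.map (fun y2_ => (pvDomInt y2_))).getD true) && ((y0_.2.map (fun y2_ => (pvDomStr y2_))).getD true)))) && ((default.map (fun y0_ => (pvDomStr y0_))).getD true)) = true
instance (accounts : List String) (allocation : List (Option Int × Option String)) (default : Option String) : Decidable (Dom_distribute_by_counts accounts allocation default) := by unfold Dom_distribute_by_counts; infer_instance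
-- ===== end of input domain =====

-- B re-decomposes A's per-segment bulk appends into a per-account loop with a cursor
-- into the allocation list; same cost class, different structure ("alternative").

-- ===== PORT A =====
-- A's for-loop over allocation: state (proxies, assigned); `break` = return the pair.
def loopA (n : Int) : List (Option Int × Option String) → List (Option String) → Int → List (Option String) × Int
  | [], proxies, assigned => (proxies, assigned)
  | (count, proxy) :: rest, proxies, assigned =>
    match count with
    | none => (proxies ++ List.replicate (n - assigned).toNat proxy, n)
    | some c =>
      if c ≤ 0 then loopA n rest proxies assigned
      else
        let take := min c (n - assigned)
        if n ≤ assigned + take then (proxies ++ List.replicate take.toNat proxy, assigned + take)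
        else loopA n rest (proxies ++ List.replicate take.toNat proxy) (assigned + take)

def distribute_by_counts (accounts : List String) (allocation : List (Option Int × Option String)) (default : Option String) : List (Option String) :=
  let n : Int := accounts.length
  match loopA n allocation [] 0 with
  | (proxies, assigned) =>
    if assigned < n then proxies ++ List.replicate (n - assigned).toNat default else proxies

-- ===== PORT B =====
-- B's inner `while remaining <= 0 and i < len(allocation)` loop; the index cursor is
-- ported as the suffix of the allocation list.
def advB (n : Int) : List (Option Int × Option String) → Int → Option String → List (Option Int × Option String) × Int × Option String
  | [], remaining, cur => ([], remaining, cur)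
  | (count, proxy) :: rest, remaining, cur =>
    if remaining ≤ 0 then
      match count with
      | none => advB n rest n proxy
      | some c => if 0 < c then advB n rest c proxy else advB n rest remaining cur
    else ((count, proxy) :: rest, remaining, cur)

-- B's outer `for _ in range(n)` loop: one output element per iteration.
def loopB (n : Int) (default : Option String) : Nat → List (Option Int × Option String) → Int → Option String → List (Option String)
  | 0, _, _, _ => []
  | fuel + 1, alloc, remaining, cur =>
    match advB n alloc remaining cur with
    | (alloc', r', cur') =>
      if 0 < r' then cur' :: loopB n default fuel alloc' (r' - 1) cur'
      else default :: loopB n default fuel alloc' r' cur'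

def distribute_by_counts_alt (accounts : List String) (allocation : List (Option Int × Option String)) (default : Option String) : List (Option String) :=
  let n : Int := accounts.length
  loopB n default accounts.length allocation 0 none

-- ===== PRECONDITION & SPEC =====
def Spec_distribute_by_counts (accounts : List String) (allocation : List (Option Int × Option String)) (default : Option String) (out : List (Option String)) : Prop := out = distribute_by_counts_alt accounts allocation default
instance (accounts : List String) (allocation : List (Option Int × Option String)) (default : Option String) (out : List (Option String)) : Decidable (Spec_distribute_by_counts accounts allocation default out) := by unfold Spec_distribute_by_counts; infer_instance

-- ===== CLAIM (what is proved, stated in full; the proofs are below) =====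
def Claim_equal_distribute_by_counts : Prop := ∀ (accounts : List String) (allocation : List (Option Int × Option String)) (default : Option String), Dom_distribute_by_counts accounts allocation default → Spec_distribute_by_counts accounts allocation default (distribute_by_counts accounts allocation default)

-- ===== LEMMAS AND PROOFS =====

-- Common spine: the answer as a function of how many slots are left and the allocation suffix.
def specRun (default : Option String) : Nat → List (Option Int × Option String) → List (Option String)
  | fuel, [] => List.replicate fuel default
  | fuel, (none, p) :: _ => List.replicate fuel p
  | fuel, (some c, p) :: rest =>
      if c ≤ 0 then specRun default fuel rest
      else List.replicate (min c.toNat fuel) p ++ specRun default (fuel - min c.toNat fuel) rest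

theorem specRun_zero (default : Option String) (alloc : List (Option Int × Option String)) :
    specRun default 0 alloc = [] := by
  induction alloc with
  | nil => simp [specRun]
  | cons hd tl ih =>
    obtain ⟨c, p⟩ := hd
    cases c with
    | none => simp [specRun]
    | some c => simp [specRun, ih]

theorem advB_pos (n : Int) (alloc : List (Option Int × Option String)) (r : Int) (cur : Option String)
    (hr : 0 < r) : advB n alloc r cur = (alloc, r, cur) := by
  cases alloc with
  | nil => simp [advB]
  | cons hd tl =>
    obtain ⟨c, p⟩ := hd
    simp [advB]
    intro h; omega

theorem loopB_run (n : Int) (default : Option String) (fuel : Nat)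
    (alloc : List (Option Int × Option String)) (r : Int) (cur : Option String) (hr : 0 ≤ r) :
    loopB n default fuel alloc r cur =
      List.replicate (min r.toNat fuel) cur ++ loopB n default (fuel - min r.toNat fuel) alloc 0 cur := by
  induction fuel generalizing r with
  | zero => simp [loopB]
  | succ fuel ih =>
    rcases eq_or_lt_of_le hr with h0 | hpos
    · have : r = 0 := h0.symm
      subst this
      simp
    · rw [loopB, advB_pos n alloc r cur hpos]
      simp only []
      rw [if_pos hpos]
      rw [ih (r - 1) (by omega)]
      rw [show min r.toNat (fuel + 1) = min (r - 1).toNat fuel + 1 by omega]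
      rw [show fuel + 1 - (min (r - 1).toNat fuel + 1) = fuel - min (r - 1).toNat fuel by omega]
      rw [List.replicate_succ, List.cons_append]

theorem loopB_spec (n : Int) (default cur : Option String)
    (alloc : List (Option Int × Option String)) (fuel : Nat) (hle : (fuel : Int) ≤ n) :
    loopB n default fuel alloc 0 cur = specRun default fuel alloc := by
  induction alloc generalizing fuel cur with
  | nil =>
    clear hle
    induction fuel with
    | zero => simp [loopB, specRun]
    | succ fuel ih2 =>
      rw [loopB]
      have : advB n [] 0 cur = ([], 0, cur) := by simp [advB]
      rw [this]
      simp only [lt_irrefl, if_false]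
      rw [ih2]
      simp [specRun, List.replicate_succ]
  | cons hd tl ih =>
    obtain ⟨c, p⟩ := hd
    cases fuel with
    | zero => rw [specRun_zero]; simp [loopB]
    | succ fuel =>
      cases c with
      | none =>
        have hn : (0:Int) < n := by omega
        rw [loopB]
        have hadv : advB n ((none, p) :: tl) 0 cur = (tl, n, p) := by
          rw [advB]
          simp only [le_refl, if_true]
          exact advB_pos n tl n p hn
        rw [hadv]
        simp only []
        rw [if_pos hn]
        rw [loopB_run n default fuel tl (n - 1) p (by omega)]
        rw [show min (n - 1).toNat fuel = fuel by omega]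
        simp [loopB, specRun, List.replicate_succ]
      | some c =>
        by_cases hc : c ≤ 0
        · have hadv : advB n ((some c, p) :: tl) 0 cur = advB n tl 0 cur := by
            rw [advB]
            simp [hc]
          have hstep : loopB n default (fuel + 1) ((some c, p) :: tl) 0 cur
              = loopB n default (fuel + 1) tl 0 cur := by
            rw [loopB, hadv, loopB]
          rw [hstep, ih cur (fuel + 1) hle, specRun, if_pos hc]
        · rw [not_le] at hc
          have hadv : advB n ((some c, p) :: tl) 0 cur = (tl, c, p) := by
            rw [advB]
            simp only [le_refl, if_true]
            simp only [if_pos hc]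
            exact advB_pos n tl c p hc
          rw [loopB, hadv]
          simp only []
          rw [if_pos hc]
          rw [loopB_run n default fuel tl (c - 1) p (by omega)]
          rw [ih p (fuel - min (c - 1).toNat fuel) (by omega)]
          rw [specRun, if_neg (by omega)]
          rw [show min c.toNat (fuel + 1) = min (c - 1).toNat fuel + 1 by omega]
          rw [show fuel + 1 - (min (c - 1).toNat fuel + 1) = fuel - min (c - 1).toNat fuel by omega]
          rw [List.replicate_succ, List.cons_append]

theorem loopA_spec (n : Int) (default : Option String)
    (alloc : List (Option Int × Option String)) (p : List (Option String)) (a : Int)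
    (ha0 : 0 ≤ a) (han : a ≤ n) :
    (if (loopA n alloc p a).2 < n
       then (loopA n alloc p a).1 ++ List.replicate (n - (loopA n alloc p a).2).toNat default
       else (loopA n alloc p a).1)
    = p ++ specRun default (n - a).toNat alloc := by
  induction alloc generalizing p a with
  | nil =>
    simp only [loopA, specRun]
    by_cases h : a < n
    · rw [if_pos h]
    · rw [if_neg h]
      rw [show (n - a).toNat = 0 by omega]
      simp
  | cons hd tl ih =>
    obtain ⟨c, pr⟩ := hd
    cases c with
    | none =>
      simp only [loopA, specRun]
      rw [if_neg (by omega)]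
    | some c =>
      by_cases hc : c ≤ 0
      · simp only [loopA, if_pos hc]
        rw [ih p a ha0 han, specRun, if_pos hc]
      · simp only [loopA, if_neg hc]
        rw [not_le] at hc
        rw [specRun, if_neg (not_le.mpr hc)]
        by_cases hfull : n ≤ a + min c (n - a)
        · simp only [if_pos hfull]
          rw [if_neg (by omega)]
          rw [show min c.toNat (n - a).toNat = (n - a).toNat by omega]
          rw [show (n - a).toNat - (n - a).toNat = 0 by omega]
          rw [specRun_zero, List.append_nil]
          rw [show min c (n - a) = n - a by omega]
        · simp only [if_neg hfull]
          rw [not_le] at hfull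
          rw [ih (p ++ List.replicate (min c (n - a)).toNat pr) (a + min c (n - a)) (by omega) (by omega)]
          rw [show min c.toNat (n - a).toNat = (min c (n - a)).toNat by omega]
          rw [show (n - a).toNat - (min c (n - a)).toNat = (n - (a + min c (n - a))).toNat by omega]
          rw [List.append_assoc]

-- ===== VERDICT (by name: the statement is the Claim_ definition above) =====
theorem distribute_by_counts_spec : Claim_equal_distribute_by_counts := by
  intro accounts allocation default _
  unfold Spec_distribute_by_counts distribute_by_counts distribute_by_counts_alt
  have hA := loopA_spec (accounts.length : Int) default allocation [] 0 (by omega) (by positivity)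
  have hB := loopB_spec (accounts.length : Int) default none allocation accounts.length (by omega)
  simp only [Int.sub_zero, Int.toNat_natCast, List.nil_append] at hA
  simp only []
  rw [hB, ← hA]
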